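-- pv_equiv track=rewrite | github.com/na-dounoshita/PMweb-demo | nadja-pm-prototype/api/app/pm_engine.py | _compute_critical_path
-- ===== SOURCE A (Python) =====
-- def _compute_critical_path(freq_dfg: dict, start_acts: dict, end_acts: dict) -> list:
--     """最高頻度のエッジを辿ってクリティカルパスを特定する"""
--     adj: dict[str, tuple[str, int]] = {}
--     for (src, dst), count in freq_dfg.items():
--         if src not in adj or count > adj[src][1]:
--             adj[src] = (dst, count)
--
--     if not start_acts:
--         return []
--     best_start = max(start_acts.items(), key=lambda x: x[1])[0]
--     path_edges = []
--     visited: set[str] = set()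
--     current = best_start
--     while current in adj and current not in visited:
--         visited.add(current)
--         next_node, _ = adj[current]
--         path_edges.append({"from": current, "to": next_node})
--         if next_node in end_acts:
--             break
--         current = next_node
--     return path_edges
-- ===== SOURCE B (Python) =====
-- def _compute_critical_path(freq_dfg: dict, start_acts: dict, end_acts: dict) -> list:
--     """Two-stage: grow the node sequence by repeated max() over a per-node edge
--     comprehension (no adjacency index), then zip consecutive nodes into edge dicts."""
--     if not start_acts:
--         return []
--     nodes = [max(start_acts.items(), key=lambda kv: kv[1])[0]]
--     seen = set()
--     while nodes[-1] not in seen: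
--         current = nodes[-1]
--         out = [(dst, c) for (src, dst), c in freq_dfg.items() if src == current]
--         if not out:
--             break
--         seen.add(current)
--         nxt = max(out, key=lambda p: p[1])[0]
--         nodes.append(nxt)
--         if nxt in end_acts:
--             break
--     return [{"from": a, "to": b} for a, b in zip(nodes, nodes[1:])]
-- ===== Notes on version B (the rewrite author's own statement) =====
-- stated objective: alternative
-- what changed: B drops A's precomputed adjacency dict and its edge-by-edge accumulator loop: it grows the node sequence by repeated max() over a per-node comprehension of outgoing edges, then builds the edge dicts afterwards by zipping consecutive nodes.
import Mathlib
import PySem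

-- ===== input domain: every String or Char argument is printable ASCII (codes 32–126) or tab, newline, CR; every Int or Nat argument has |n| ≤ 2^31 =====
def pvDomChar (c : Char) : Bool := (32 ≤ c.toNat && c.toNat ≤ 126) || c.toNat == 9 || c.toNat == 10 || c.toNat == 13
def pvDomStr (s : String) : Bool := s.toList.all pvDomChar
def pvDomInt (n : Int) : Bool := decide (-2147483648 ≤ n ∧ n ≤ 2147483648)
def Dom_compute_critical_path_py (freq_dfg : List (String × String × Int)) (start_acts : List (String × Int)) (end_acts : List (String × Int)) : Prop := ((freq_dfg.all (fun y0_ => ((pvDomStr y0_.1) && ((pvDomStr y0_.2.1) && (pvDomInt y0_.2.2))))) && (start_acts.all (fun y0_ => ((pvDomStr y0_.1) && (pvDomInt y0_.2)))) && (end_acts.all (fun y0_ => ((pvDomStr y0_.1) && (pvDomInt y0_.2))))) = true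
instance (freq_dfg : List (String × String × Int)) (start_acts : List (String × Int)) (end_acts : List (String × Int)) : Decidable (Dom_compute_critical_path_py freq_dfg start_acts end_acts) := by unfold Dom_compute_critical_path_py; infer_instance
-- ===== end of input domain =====

-- B replaces A's adjacency index + edge-accumulating loop by a node-sequence walk
-- (repeated max over a per-node edge comprehension) followed by a zip into edge dicts.

-- ===== PORT A =====
-- adj: dict[str, tuple[str, int]]; first strictly-greater-count edge per source wins
def pvAdjA (freq_dfg : List (String × String × Int)) : PySem.Dict String (String × Int) :=
  freq_dfg.foldl (fun adj e =>
    match adj.get? e.1 with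
    | none => adj.insert e.1 (e.2.1, e.2.2)
    | some p => if e.2.2 > p.2 then adj.insert e.1 (e.2.1, e.2.2) else adj)
    PySem.Dict.empty

-- the while loop; fuel = freq_dfg.length + 1 suffices: each iteration adds the current
-- node (a key of adj, of which there are ≤ freq_dfg.length) to visited.
def pvLoopA (adj : PySem.Dict String (String × Int)) (end_acts : List (String × Int)) :
    Nat → PySem.Set String → String → List (List (String × String)) → List (List (String × String))
  | 0, _, _, acc => acc.reverse
  | fuel+1, visited, current, acc =>
    match adj.get? current with
    | none => acc.reverse
    | some nb =>
      if PySem.Set.contains visited current then acc.reverse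
      else
        let visited' := PySem.Set.add visited current
        let acc' := [("from", current), ("to", nb.1)] :: acc
        if end_acts.any (fun p => p.1 == nb.1) then acc'.reverse
        else pvLoopA adj end_acts fuel visited' nb.1 acc'

def compute_critical_path_py (freq_dfg : List (String × String × Int)) (start_acts : List (String × Int)) (end_acts : List (String × Int)) : List (List (String × String)) :=
  let adj := pvAdjA freq_dfg
  if start_acts.isEmpty then []
  else
    match PySem.List.max? start_acts (fun x => x.2) with
    | none => []  -- dead: start_acts nonempty here
    | some m => pvLoopA adj end_acts (freq_dfg.length + 1) PySem.Set.empty m.1 []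

-- ===== PORT B =====
-- the while loop of Source B: grows the node list; `out` is the comprehension, `max` keeps
-- the first maximal outgoing edge; same fuel bound as A's loop.
def pvWalkB (freq_dfg : List (String × String × Int)) (end_acts : List (String × Int)) :
    Nat → PySem.Set String → String → List String → List String
  | 0, _, _, nodes => nodes
  | fuel+1, seen, current, nodes =>
    if PySem.Set.contains seen current then nodes
    else
      let out := (freq_dfg.filter (fun e => e.1 == current)).map (fun e => (e.2.1, e.2.2))
      if out.isEmpty then nodes
      else
        match PySem.List.max? out (fun p => p.2) with
        | none => nodes  -- dead: out nonempty here
        | some m =>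
          let nodes' := nodes ++ [m.1]
          if end_acts.any (fun p => p.1 == m.1) then nodes'
          else pvWalkB freq_dfg end_acts fuel (PySem.Set.add seen current) m.1 nodes'

def compute_critical_path_py_alt (freq_dfg : List (String × String × Int)) (start_acts : List (String × Int)) (end_acts : List (String × Int)) : List (List (String × String)) :=
  if start_acts.isEmpty then []
  else
    match PySem.List.max? start_acts (fun kv => kv.2) with
    | none => []  -- dead: start_acts nonempty here
    | some m =>
      let nodes := pvWalkB freq_dfg end_acts (freq_dfg.length + 1) PySem.Set.empty m.1 [m.1]
      (nodes.zip (nodes.drop 1)).map (fun ab => [("from", ab.1), ("to", ab.2)])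

-- ===== PRECONDITION & SPEC =====
def Spec_compute_critical_path_py (freq_dfg : List (String × String × Int)) (start_acts : List (String × Int)) (end_acts : List (String × Int)) (out : List (List (String × String))) : Prop := out = compute_critical_path_py_alt freq_dfg start_acts end_acts
instance (freq_dfg : List (String × String × Int)) (start_acts : List (String × Int)) (end_acts : List (String × Int)) (out : List (List (String × String))) : Decidable (Spec_compute_critical_path_py freq_dfg start_acts end_acts out) := by unfold Spec_compute_critical_path_py; infer_instance

-- ===== CLAIM =====
def Claim_equal_compute_critical_path_py : Prop := ∀ (freq_dfg : List (String × String × Int)) (start_acts : List (String × Int)) (end_acts : List (String × Int)), Dom_compute_critical_path_py freq_dfg start_acts end_acts → Spec_compute_critical_path_py freq_dfg start_acts end_acts (compute_critical_path_py freq_dfg start_acts end_acts)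

-- ===== LEMMAS AND PROOFS =====

-- proof helper: the tail of the node sequence produced from `cur` (cons-built)
def pvTail (freq_dfg : List (String × String × Int)) (end_acts : List (String × Int)) :
    Nat → PySem.Set String → String → List String
  | 0, _, _ => []
  | fuel+1, seen, current =>
    if PySem.Set.contains seen current then []
    else
      let out := (freq_dfg.filter (fun e => e.1 == current)).map (fun e => (e.2.1, e.2.2))
      if out.isEmpty then []
      else
        match PySem.List.max? out (fun p => p.2) with
        | none => []
        | some m =>
          if end_acts.any (fun p => p.1 == m.1) then [m.1]
          else m.1 :: pvTail freq_dfg end_acts fuel (PySem.Set.add seen current) m.1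

-- proof helper: consecutive-pair edges of cur :: rest
def pvEdges : String → List String → List (List (String × String))
  | _, [] => []
  | c, n :: rest => [("from", c), ("to", n)] :: pvEdges n rest

theorem pvWalkB_eq_tail (fd : List (String × String × Int)) (ea : List (String × Int))
    (fuel : Nat) (seen : PySem.Set String) (cur : String) (nodes : List String) :
    pvWalkB fd ea fuel seen cur nodes = nodes ++ pvTail fd ea fuel seen cur := by
  induction fuel generalizing seen cur nodes with
  | zero => simp [pvWalkB, pvTail]
  | succ n ih =>
    simp only [pvWalkB, pvTail]
    split
    · simp
    · split
      · simp
      · split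
        · simp
        · split
          · simp
          · rw [ih]; simp

theorem pvZip_eq_edges (f : String × String → List (String × String))
    (hf : f = fun ab => [("from", ab.1), ("to", ab.2)])
    (c : String) (rest : List String) :
    ((c :: rest).zip rest).map f = pvEdges c rest := by
  induction rest generalizing c with
  | nil => simp [pvEdges]
  | cons n t ih => simp [pvEdges, hf, ← ih n]

-- bridge: unfold max? to the explicit first-maximal fold (instances differ syntactically)
theorem pvMax_eq_foldl (xs : List (String × Int)) :
    PySem.List.max? xs (fun p => p.2)
      = xs.foldl (fun acc x =>
          match acc with
          | none => some x
          | some m => if m.2 < x.2 then some x else some m) none := by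
  simp only [PySem.List.max?]
  congr 1
  funext acc x
  cases acc with
  | none => rfl
  | some m => by_cases h : m.2 < x.2 <;> simp [h]

-- A's adjacency lookup is B's "max over the outgoing-edge comprehension".
theorem pvAdj_get_eq_max (fd : List (String × String × Int)) (cur : String) :
    (pvAdjA fd).get? cur
      = PySem.List.max? ((fd.filter (fun e => e.1 == cur)).map (fun e => (e.2.1, e.2.2)))
          (fun p => p.2) := by
  suffices h : ∀ (l : List (String × String × Int)) (d : PySem.Dict String (String × Int)),
      (l.foldl (fun adj e =>
        match adj.get? e.1 with
        | none => adj.insert e.1 (e.2.1, e.2.2)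
        | some p => if e.2.2 > p.2 then adj.insert e.1 (e.2.1, e.2.2) else adj) d).get? cur
      = ((l.filter (fun e => e.1 == cur)).map (fun e => (e.2.1, e.2.2))).foldl
          (fun acc x =>
            match acc with
            | none => some x
            | some m => if m.2 < x.2 then some x else some m) (d.get? cur) by
    rw [pvMax_eq_foldl]
    have h0 : (PySem.Dict.empty : PySem.Dict String (String × Int)).get? cur = none := rfl
    have := h fd PySem.Dict.empty
    rw [h0] at this
    simpa [pvAdjA] using this
  intro l
  induction l with
  | nil => intro d; rfl
  | cons e t ih =>
    intro d
    simp only [List.foldl_cons, List.filter_cons]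
    by_cases hc : e.1 = cur
    · subst hc
      simp only [beq_self_eq_true, if_true, List.map_cons, List.foldl_cons]
      rw [ih]
      congr 1
      cases hg : d.get? e.1 with
      | none => simp [PySem.Dict.get?_insert_self]
      | some p =>
        by_cases hlt : e.2.2 > p.2
        · simp [hlt, PySem.Dict.get?_insert_self]
        · simp [hlt, hg]
    · have hne2 : cur ≠ e.1 := fun h => hc h.symm
      have hne : (e.1 == cur) = false := by simp [hc]
      simp only [hne, Bool.false_eq_true, if_false]
      rw [ih]
      congr 1
      cases hg : d.get? e.1 with
      | none =>
        show (d.insert e.1 (e.2.1, e.2.2)).get? cur = d.get? cur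
        exact PySem.Dict.get?_insert_of_ne d (e.2.1, e.2.2) hne2
      | some p =>
        show (if e.2.2 > p.2 then d.insert e.1 (e.2.1, e.2.2) else d).get? cur = d.get? cur
        by_cases hlt : e.2.2 > p.2
        · rw [if_pos hlt]
          exact PySem.Dict.get?_insert_of_ne d (e.2.1, e.2.2) hne2
        · rw [if_neg hlt]

-- A's accumulator loop produces exactly the consecutive-pair edges of B's node tail.
theorem pvLoopA_eq_edges (fd : List (String × String × Int)) (ea : List (String × Int))
    (fuel : Nat) (visited : PySem.Set String) (cur : String)
    (acc : List (List (String × String))) :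
    pvLoopA (pvAdjA fd) ea fuel visited cur acc
      = acc.reverse ++ pvEdges cur (pvTail fd ea fuel visited cur) := by
  induction fuel generalizing visited cur acc with
  | zero => simp [pvLoopA, pvTail, pvEdges]
  | succ n ih =>
    simp only [pvLoopA, pvTail, pvAdj_get_eq_max]
    by_cases hv : PySem.Set.contains visited cur
    · simp only [hv, if_true]
      cases PySem.List.max? ((fd.filter (fun e => e.1 == cur)).map (fun e => (e.2.1, e.2.2)))
          (fun p => p.2) <;> simp [pvEdges]
    · simp only [hv, Bool.false_eq_true, if_false]
      cases hm : PySem.List.max? ((fd.filter (fun e => e.1 == cur)).map (fun e => (e.2.1, e.2.2)))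
          (fun p => p.2) with
      | none =>
        have he : ((fd.filter (fun e => e.1 == cur)).map (fun e => (e.2.1, e.2.2))) = [] :=
          (PySem.List.max?_eq_none_iff _ _).mp hm
        simp [he, pvEdges]
      | some m =>
        have hne : ((fd.filter (fun e => e.1 == cur)).map (fun e => (e.2.1, e.2.2))).isEmpty = false := by
          cases hl : (fd.filter (fun e => e.1 == cur)).map (fun e => (e.2.1, e.2.2)) with
          | nil => rw [hl] at hm; simp [PySem.List.max?] at hm
          | cons a t => simp
        simp only [hne, Bool.false_eq_true, if_false]
        by_cases hend : ea.any (fun p => p.1 == m.1)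
        · simp [hend, pvEdges]
        · simp only [hend, Bool.false_eq_true, if_false]
          rw [ih]
          simp [pvEdges]

-- ===== VERDICT =====
theorem compute_critical_path_py_spec : Claim_equal_compute_critical_path_py := by
  intro fd sa ea _
  unfold Spec_compute_critical_path_py compute_critical_path_py compute_critical_path_py_alt
  by_cases h : sa.isEmpty
  · simp [h]
  simp only [h, Bool.false_eq_true, if_false]
  cases hm : PySem.List.max? sa (fun x => x.2) with
  | none => rfl
  | some m =>
    dsimp only
    rw [pvLoopA_eq_edges, pvWalkB_eq_tail]
    simp only [List.reverse_nil, List.nil_append, List.cons_append,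
      List.drop_succ_cons, List.drop_zero]
    rw [pvZip_eq_edges _ rfl]
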